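-- pv_equiv track=rewrite | github.com/almyy/flutrack_backend | prediction/twitter_epidemic.py | invert_weeks
-- ===== SOURCE A (Python) =====
-- def invert_weeks(in_weeks):
--     out_cities = []
--     for i in range(0, len(in_weeks[0])):
--         out_city_list = []
--         for in_week in in_weeks:
--             out_city_list.append(in_week[i])
--         out_cities.append(out_city_list)
--     return out_cities
-- ===== SOURCE B (Python) =====
-- def invert_weeks(in_weeks):
--     cols = len(in_weeks[0])
--     stacks = [list(reversed(r)) for r in in_weeks]
--     out_cities = []
--     for _ in range(cols):
--         out_cities.append([s.pop() for s in stacks])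
--     return out_cities
-- ===== Notes on version B (the rewrite author's own statement) =====
-- stated objective: alternative
-- what changed: B reverses every row into a stack and builds each output row by popping the current head of every stack, consuming the input, instead of A's indexed nested loops re-reading the rows once per column.
import Mathlib
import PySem

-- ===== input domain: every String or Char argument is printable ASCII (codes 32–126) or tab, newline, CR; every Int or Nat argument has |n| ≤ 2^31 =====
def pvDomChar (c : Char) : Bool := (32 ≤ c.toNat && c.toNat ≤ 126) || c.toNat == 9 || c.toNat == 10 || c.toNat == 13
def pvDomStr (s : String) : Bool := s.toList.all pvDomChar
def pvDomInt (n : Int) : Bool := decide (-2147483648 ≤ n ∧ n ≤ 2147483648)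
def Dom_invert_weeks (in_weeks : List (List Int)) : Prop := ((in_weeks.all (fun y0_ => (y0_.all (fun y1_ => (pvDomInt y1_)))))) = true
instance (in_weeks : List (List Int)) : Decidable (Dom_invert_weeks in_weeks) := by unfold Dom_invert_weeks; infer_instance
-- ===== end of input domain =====

-- B reverses every row into a stack and pops one element per stack per output row,
-- consuming the input, instead of A's indexed nested loops (objective: alternative).

-- ===== PORT A =====
-- column-major: for i in range(0, len(in_weeks[0])): collect in_week[i] over all weeks
def invert_weeks (in_weeks : List (List Int)) : List (List Int) :=
  (PySem.List.pyRange 0 ((PySem.List.pyGetD in_weeks 0 []).length : Int) 1).foldl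
    (fun out_cities i =>
      out_cities ++ [in_weeks.foldl (fun col w => col ++ [PySem.List.pyGetD w i 0]) []])
    []

-- ===== PORT B =====
-- reverse every row into a stack; each output row pops the current head of every stack
-- (Python's s.pop() is ported value-and-rest: value = pyGetD s (-1) 0, rest = s.dropLast)
def invert_weeks_alt (in_weeks : List (List Int)) : List (List Int) :=
  ((List.range (PySem.List.pyGetD in_weeks 0 []).length).foldl
    (fun (st : List (List Int) × List (List Int)) _ =>
      (st.1.map List.dropLast,
       st.2 ++ [st.1.map (fun s => PySem.List.pyGetD s (-1) 0)]))
    (in_weeks.map List.reverse, [])).2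

-- ===== PRECONDITION & SPEC =====
-- Pre_ excludes exactly the inputs where Python A raises IndexError: the empty list
-- (in_weeks[0] fails) and inputs with some row shorter than row 0 (in_week[i] fails).
def Pre_invert_weeks (in_weeks : List (List Int)) : Prop :=
  in_weeks ≠ [] ∧ ∀ w ∈ in_weeks, (in_weeks.headD []).length ≤ w.length
instance (in_weeks : List (List Int)) : Decidable (Pre_invert_weeks in_weeks) := by
  unfold Pre_invert_weeks; infer_instance
def pvWitness_invert_weeks : List (List Int) := [[1, 2], [3, 4]]

def Spec_invert_weeks (in_weeks : List (List Int)) (out : List (List Int)) : Prop := out = invert_weeks_alt in_weeks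
instance (in_weeks : List (List Int)) (out : List (List Int)) : Decidable (Spec_invert_weeks in_weeks out) := by unfold Spec_invert_weeks; infer_instance

-- ===== CLAIM (what is proved, stated in full; the proofs are below) =====
def Claim_equal_invert_weeks : Prop := ∀ (in_weeks : List (List Int)), Dom_invert_weeks in_weeks → Pre_invert_weeks in_weeks → Spec_invert_weeks in_weeks (invert_weeks in_weeks)

-- ===== LEMMAS AND PROOFS =====

-- common normal form: column i is in_weeks.map (fun w => w[i])
def pvCol (in_weeks : List (List Int)) (i : Nat) : List Int :=
  in_weeks.map (fun w => PySem.List.pyGetD w (i : Int) 0)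

theorem invert_weeks_eq_cols (in_weeks : List (List Int)) :
    invert_weeks in_weeks =
      (List.range (PySem.List.pyGetD in_weeks 0 []).length).map (pvCol in_weeks) := by
  unfold invert_weeks
  rw [PySem.List.pyRange_zero_nat]
  rw [PySem.List.foldl_append_singleton_eq_map]
  rw [List.map_map]
  simp only [List.nil_append]
  refine List.map_congr_left fun i _ => ?_
  simp only [Function.comp]
  rw [PySem.List.foldl_append_singleton_eq_map]
  simp [pvCol]

-- popping the stack of r after n pops: value is r[n] (default-carrying), rest is r.drop (n+1) reversed
theorem pop_val (r : List Int) (n : Nat) :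
    PySem.List.pyGetD ((r.drop n).reverse) (-1) 0 = PySem.List.pyGetD r (n : Int) 0 := by
  by_cases h : n < r.length
  · have hne : (r.drop n) ≠ [] := by
      intro hc; have := List.drop_eq_nil_iff.mp hc; omega
    have hne' : (r.drop n).reverse ≠ [] := by simpa using hne
    rw [PySem.List.pyGetD_neg_one _ _ hne', PySem.List.pyGetD_natCast]
    rw [List.getLast_reverse]
    simp [List.getD_eq_getElem?_getD, h]
  · have hd : r.drop n = [] := List.drop_eq_nil_iff.mpr (by omega)
    rw [hd, PySem.List.pyGetD_natCast]
    simp [List.getD_eq_getElem?_getD, List.getElem?_eq_none (by omega : r.length ≤ n),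
      PySem.List.pyGetD, PySem.List.pyGet?, PySem.List.pyIdx?]

theorem pop_rest (r : List Int) (n : Nat) :
    ((r.drop n).reverse).dropLast = (r.drop (n + 1)).reverse := by
  rw [List.dropLast_reverse]
  simp [List.tail_drop]

-- loop invariant: after n iterations the stacks hold (r.drop n).reverse and the output is the first n columns
theorem alt_fold_state (in_weeks : List (List Int)) (n : Nat) :
    (List.range n).foldl
      (fun (st : List (List Int) × List (List Int)) _ =>
        (st.1.map List.dropLast,
         st.2 ++ [st.1.map (fun s => PySem.List.pyGetD s (-1) 0)]))
      (in_weeks.map List.reverse, [])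
    = (in_weeks.map (fun r => (r.drop n).reverse), (List.range n).map (pvCol in_weeks)) := by
  induction n with
  | zero => simp
  | succ n ih =>
    rw [List.range_succ, List.foldl_append, ih, List.foldl_cons, List.foldl_nil]
    refine Prod.ext ?_ ?_
    · simp only [List.map_map]
      exact List.map_congr_left fun r _ => pop_rest r n
    · simp only [List.map_append, List.map_map]
      refine congrArg₂ (· ++ ·) rfl ?_
      simp only [List.map_cons, List.map_nil, pvCol]
      refine congrArg₂ List.cons (List.map_congr_left fun r _ => ?_) rfl
      exact pop_val r n

-- ===== VERDICT (by name: the statement is the Claim_ definition above) =====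
theorem invert_weeks_spec : Claim_equal_invert_weeks := by
  intro in_weeks _ _
  show invert_weeks in_weeks = invert_weeks_alt in_weeks
  rw [invert_weeks_eq_cols, invert_weeks_alt, alt_fold_state]
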